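-- pv_equiv track=rewrite | github.com/jarralfa-max/pos_spj_v13.4 | pos_spj_v13.4/tests/test_fase2_qr_parser.py | _parsear
-- ===== SOURCE A (Python) =====
-- PREFIJOS_QR = {
--     "SPJ:CONT":   "contenedor",
--     "SPJ:PROD":   "producto",
--     "SPJ:FIDEL":  "cliente_fidelidad",
--     "SPJ:DEL":    "ticket_delivery",
--     "SPJ:MAP":    "mapa_entrega",
-- }
--
-- def _parsear(raw: str) -> tuple:
--     cleaned = raw.strip()
--     upper = cleaned.upper()
--     for prefijo, tipo in PREFIJOS_QR.items():
--         needle = prefijo + ":"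
--         if upper.startswith(needle):
--             uuid_qr = cleaned[len(needle):]
--             return tipo, uuid_qr
--     return "barcode", cleaned
-- ===== SOURCE B (Python) =====
-- PREFIJOS_QR = {
--     "SPJ:CONT":   "contenedor",
--     "SPJ:PROD":   "producto",
--     "SPJ:FIDEL":  "cliente_fidelidad",
--     "SPJ:DEL":    "ticket_delivery",
--     "SPJ:MAP":    "mapa_entrega",
-- }
--
-- def _parsear(raw: str) -> tuple:
--     cleaned = raw.strip()
--     p0, _, rest = cleaned.partition(':')
--     p1, sep2, uuid = rest.partition(':')
--     if sep2:
--         tipo = PREFIJOS_QR.get((p0 + ':' + p1).upper())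
--         if tipo is not None:
--             return tipo, uuid
--     return "barcode", cleaned
-- ===== Notes on version B (the rewrite author's own statement) =====
-- stated objective: idiomatic
-- what changed: Instead of scanning all five prefixes with startswith, B tokenizes the string once with two partition(':') calls and resolves the uppercased 'XXX:YYYY' key by a single dict lookup.
import Mathlib
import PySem

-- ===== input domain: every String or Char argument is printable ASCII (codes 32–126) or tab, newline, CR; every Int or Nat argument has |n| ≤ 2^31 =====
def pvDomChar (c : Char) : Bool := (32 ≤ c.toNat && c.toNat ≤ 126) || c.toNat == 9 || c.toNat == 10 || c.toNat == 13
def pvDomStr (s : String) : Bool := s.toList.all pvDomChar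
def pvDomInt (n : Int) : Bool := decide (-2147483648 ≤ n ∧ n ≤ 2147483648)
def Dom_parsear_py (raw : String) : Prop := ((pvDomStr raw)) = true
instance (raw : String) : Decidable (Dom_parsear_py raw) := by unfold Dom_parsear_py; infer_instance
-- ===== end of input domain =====

-- B replaces A's scan over all five prefixes (startswith each) by tokenizing the string once
-- with two partition(':') calls and a single dict lookup on the uppercased "XXX:YYYY" key.

-- ===== PORT A =====
-- the module constant PREFIJOS_QR, in insertion order (keys as code-point lists)
def pvPREFIJOS_QR : List (List Char × String) :=
  [("SPJ:CONT".toList, "contenedor"),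
   ("SPJ:PROD".toList, "producto"),
   ("SPJ:FIDEL".toList, "cliente_fidelidad"),
   ("SPJ:DEL".toList, "ticket_delivery"),
   ("SPJ:MAP".toList, "mapa_entrega")]

-- the 'for prefijo, tipo in PREFIJOS_QR.items():' loop of A
def pvALoop (cleaned upper : List Char) : List (List Char × String) → String × String
  | [] => ("barcode", String.mk cleaned)
  | (prefijo, tipo) :: rest =>
    let needle := prefijo ++ [':']
    if PySem.Chars.startswith upper needle then
      (tipo, String.mk (PySem.List.slice cleaned (some (needle.length : Int)) none))
    else pvALoop cleaned upper rest

def parsear_py (raw : String) : String × String :=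
  let cleaned := PySem.Chars.strip raw.toList
  let upper := PySem.Chars.upper cleaned
  pvALoop cleaned upper pvPREFIJOS_QR

-- ===== PORT B =====
-- str.partition(':') for the one-character separator ':' — exact: Python's s.partition(':')
-- returns (before, ':', after) at the first ':' and (s, '', '') when there is none; the Bool
-- is whether the separator was found (Python code tests the middle component's truthiness).
def pvPartitionColon : List Char → List Char × Bool × List Char
  | [] => ([], false, [])
  | c :: rest =>
    if c = ':' then ([], true, rest)
    else
      let p := pvPartitionColon rest
      (c :: p.1, p.2.1, p.2.2)

-- PREFIJOS_QR as the dict B looks the key up in (same pairs, same order)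
def pvPrefijosDict : PySem.Dict (List Char) String := PySem.Dict.mk pvPREFIJOS_QR

def parsear_py_alt (raw : String) : String × String :=
  let cleaned := PySem.Chars.strip raw.toList
  let t1 := pvPartitionColon cleaned
  let t2 := pvPartitionColon t1.2.2
  if t2.2.1 then
    match pvPrefijosDict.get? (PySem.Chars.upper (t1.1 ++ ':' :: t2.1)) with
    | some tipo => (tipo, String.mk t2.2.2)
    | none => ("barcode", String.mk cleaned)
  else ("barcode", String.mk cleaned)

-- ===== PRECONDITION & SPEC =====
def Spec_parsear_py (raw : String) (out : String × String) : Prop := out = parsear_py_alt raw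
instance (raw : String) (out : String × String) : Decidable (Spec_parsear_py raw out) := by unfold Spec_parsear_py; infer_instance

-- ===== CLAIM (what is proved, stated in full; the proofs are below) =====
def Claim_equal_parsear_py : Prop := ∀ (raw : String), Dom_parsear_py raw → Spec_parsear_py raw (parsear_py raw)

-- ===== LEMMAS AND PROOFS =====

theorem pvUpperChar_colon_iff (c : Char) : PySem.Chars.upperChar c = ':' ↔ c = ':' := by
  constructor
  · intro h
    simp only [PySem.Chars.upperChar, PySem.Chars.islower] at h
    split_ifs at h with hl
    · exfalso
      simp only [Bool.and_eq_true, decide_eq_true_eq] at hl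
      obtain ⟨h1, h2⟩ := hl
      have h1' : 97 ≤ c.toNat := by simpa [Char.le_def, UInt32.le_iff_toNat_le] using h1
      have h2' : c.toNat ≤ 122 := by simpa [Char.le_def, UInt32.le_iff_toNat_le] using h2
      have hv : (c.toNat - 32).isValidChar := Or.inl (by omega)
      have ht : (Char.ofNat (c.toNat - 32)).toNat = c.toNat - 32 := by
        rw [Char.toNat_ofNat, if_pos hv]
      have : (':' : Char).toNat = c.toNat - 32 := by rw [← h, ht]
      have h4 : (':' : Char).toNat = 58 := by decide
      omega
    · exact h
  · intro h; subst h; decide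

theorem pvCount_colon_upper (l : List Char) :
    (PySem.Chars.upper l).count ':' = l.count ':' := by
  induction l with
  | nil => rfl
  | cons c rest ih =>
    simp only [PySem.Chars.upper, List.map_cons, List.count_cons] at *
    rw [ih]
    by_cases hc : c = ':'
    · subst hc
      have h1 : PySem.Chars.upperChar ':' = ':' := by decide
      simp [h1]
    · have : ¬ PySem.Chars.upperChar c = ':' := fun h => hc ((pvUpperChar_colon_iff c).mp h)
      simp [hc, this]

theorem pvNot_colon_upper {l : List Char} (h : ':' ∉ l) : ':' ∉ PySem.Chars.upper l := by
  intro hmem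
  have h1 : 0 < (PySem.Chars.upper l).count ':' := List.count_pos_iff.mpr hmem
  rw [pvCount_colon_upper] at h1
  exact h (List.count_pos_iff.mp h1)

theorem pvPart_true (l p r : List Char) :
    pvPartitionColon l = (p, true, r) ↔ ':' ∉ p ∧ l = p ++ ':' :: r := by
  induction l generalizing p with
  | nil =>
    simp only [pvPartitionColon]
    constructor
    · intro h; cases h
    · rintro ⟨-, h⟩; cases p <;> simp at h
  | cons c rest ih =>
    simp only [pvPartitionColon]
    by_cases hc : c = ':'
    · subst hc
      simp only [if_pos rfl]
      constructor
      · rintro ⟨rfl, rfl, rfl⟩  -- hmm; Prod equality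
        exact ⟨List.not_mem_nil, rfl⟩
      · rintro ⟨hp, heq⟩
        cases p with
        | nil => simp at heq; simp [heq]
        | cons d p' =>
          simp only [List.cons_append, List.cons.injEq] at heq
          exact absurd (heq.1 ▸ List.mem_cons_self) hp
    · rw [if_neg hc]
      constructor
      · intro h
        have h1 : c :: (pvPartitionColon rest).1 = p := congrArg Prod.fst h
        have h2 : (pvPartitionColon rest).2.1 = true := congrArg (fun x => x.2.1) h
        have h3 : (pvPartitionColon rest).2.2 = r := congrArg (fun x => x.2.2) h
        obtain ⟨hp', heq⟩ := (ih (pvPartitionColon rest).1).mp (by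
          rw [← h2, ← h3])
        subst h1
        constructor
        · intro hmem
          rcases List.mem_cons.mp hmem with h' | h'
          · exact hc h'.symm
          · exact hp' h'
        · rw [List.cons_append]
          exact congrArg (List.cons c) heq
      · rintro ⟨hp, heq⟩
        cases p with
        | nil => simp at heq; exact absurd heq.1 hc
        | cons d p' =>
          simp only [List.cons_append, List.cons.injEq] at heq
          obtain ⟨rfl, heq'⟩ := heq
          have hp' : ':' ∉ p' := fun h => hp (List.mem_cons_of_mem _ h)
          have := (ih p').mpr ⟨hp', heq'⟩
          simp [this]

theorem pvPart_false (l p r : List Char) :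
    pvPartitionColon l = (p, false, r) ↔ p = l ∧ r = [] ∧ ':' ∉ l := by
  induction l generalizing p with
  | nil =>
    simp only [pvPartitionColon]
    constructor
    · intro h; cases h; exact ⟨rfl, rfl, List.not_mem_nil⟩
    · rintro ⟨rfl, rfl, -⟩; rfl
  | cons c rest ih =>
    simp only [pvPartitionColon]
    by_cases hc : c = ':'
    · subst hc
      simp only [if_pos rfl]
      constructor
      · intro h; cases h
      · rintro ⟨-, -, hmem⟩; exact absurd List.mem_cons_self hmem
    · rw [if_neg hc]
      constructor
      · intro h
        have h1 : c :: (pvPartitionColon rest).1 = p := congrArg Prod.fst h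
        have h2 : (pvPartitionColon rest).2.1 = false := congrArg (fun x => x.2.1) h
        have h3 : (pvPartitionColon rest).2.2 = r := congrArg (fun x => x.2.2) h
        obtain ⟨hp', hr, hmem⟩ := (ih (pvPartitionColon rest).1).mp (by rw [← h2, ← h3])
        refine ⟨by rw [← h1, hp'], hr, ?_⟩
        intro hm
        rcases List.mem_cons.mp hm with h' | h'
        · exact hc h'.symm
        · exact hmem h'
      · rintro ⟨rfl, rfl, hmem⟩
        have hm' : ':' ∉ rest := fun h => hmem (List.mem_cons_of_mem _ h)
        have := (ih rest).mpr ⟨rfl, rfl, hm'⟩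
        simp [this]

theorem pvPrefix_colon {x y : List Char} (hx : ':' ∉ x) (hy : ':' ∉ y) (t s : List Char) :
    (x ++ ':' :: t) <+: (y ++ ':' :: s) ↔ x = y ∧ t <+: s := by
  induction x generalizing y with
  | nil =>
    cases y with
    | nil => simp
    | cons d y' =>
      simp only [List.nil_append, List.cons_append, List.cons_prefix_cons]
      constructor
      · rintro ⟨h, -⟩; exact absurd (h ▸ List.mem_cons_self) hy
      · rintro ⟨h, -⟩; cases h
  | cons c x' ih =>
    cases y with
    | nil =>
      simp only [List.cons_append, List.nil_append, List.cons_prefix_cons]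
      constructor
      · rintro ⟨h, -⟩; exact absurd (h ▸ List.mem_cons_self) hx
      · rintro ⟨h, -⟩; cases h
    | cons d y' =>
      have hx' : ':' ∉ x' := fun h => hx (List.mem_cons_of_mem _ h)
      have hy' : ':' ∉ y' := fun h => hy (List.mem_cons_of_mem _ h)
      simp only [List.cons_append, List.cons_prefix_cons, ih hx' hy', List.cons.injEq]
      tauto

theorem pvEq_colon {x y t s : List Char} (hx : ':' ∉ x) (hy : ':' ∉ y) :
    x ++ ':' :: t = y ++ ':' :: s ↔ x = y ∧ t = s := by
  constructor
  · intro h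
    have hpre : (x ++ ':' :: t) <+: (y ++ ':' :: s) := h ▸ List.prefix_refl _
    obtain ⟨hxy, hts⟩ := (pvPrefix_colon hx hy t s).mp hpre
    subst hxy
    refine ⟨rfl, ?_⟩
    have := List.append_cancel_left h
    exact (List.cons.injEq _ _ _ _).mp this |>.2
  · rintro ⟨rfl, rfl⟩; rfl

theorem pvDrop_bundle (q0 q1 uu : List Char) :
    (q0 ++ ':' :: q1 ++ ':' :: uu).drop (q0.length + q1.length + 2) = uu := by
  have h1 : q0 ++ ':' :: q1 ++ ':' :: uu = (q0 ++ ':' :: q1 ++ [':']) ++ uu := by simp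
  have h2 : (q0 ++ ':' :: q1 ++ [':']).length = q0.length + q1.length + 2 := by
    simp; omega
  rw [h1, ← h2, List.drop_left]

theorem pvLen_upper (l : List Char) : (PySem.Chars.upper l).length = l.length := by
  simp [PySem.Chars.upper]

theorem pvUpper_append_colon (a b : List Char) :
    PySem.Chars.upper (a ++ ':' :: b) =
      PySem.Chars.upper a ++ ':' :: PySem.Chars.upper b := by
  simp [PySem.Chars.upper]
  decide

theorem pvScan_match (q0 q1 uu : List Char) (hq0 : ':' ∉ q0) (hq1 : ':' ∉ q1)
    (items : List (List Char × String))
    (hitems : ∀ pt ∈ items, ∃ a b : List Char, ':' ∉ a ∧ ':' ∉ b ∧ pt.1 = a ++ ':' :: b) :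
    pvALoop (q0 ++ ':' :: q1 ++ ':' :: uu)
        (PySem.Chars.upper (q0 ++ ':' :: q1 ++ ':' :: uu)) items =
      match (PySem.Dict.mk items).get? (PySem.Chars.upper (q0 ++ ':' :: q1)) with
      | some tipo => (tipo, String.mk uu)
      | none => ("barcode", String.mk (q0 ++ ':' :: q1 ++ ':' :: uu)) := by
  induction items with
  | nil => simp [pvALoop, PySem.Dict.get?]
  | cons pt rest ih =>
    obtain ⟨a, b, ha, hb, hpre⟩ := hitems pt List.mem_cons_self
    obtain ⟨pre, tipo⟩ := pt
    simp only at hpre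
    subst hpre
    have hU0 : ':' ∉ PySem.Chars.upper q0 := pvNot_colon_upper hq0
    have hU1 : ':' ∉ PySem.Chars.upper q1 := pvNot_colon_upper hq1
    have hu : PySem.Chars.upper (q0 ++ ':' :: q1 ++ ':' :: uu) =
        PySem.Chars.upper q0 ++ ':' :: (PySem.Chars.upper q1 ++ ':' :: PySem.Chars.upper uu) := by
      rw [show q0 ++ ':' :: q1 ++ ':' :: uu = q0 ++ ':' :: (q1 ++ ':' :: uu) by simp,
        pvUpper_append_colon, pvUpper_append_colon]
    have hkey : PySem.Chars.upper (q0 ++ ':' :: q1) =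
        PySem.Chars.upper q0 ++ ':' :: PySem.Chars.upper q1 := pvUpper_append_colon q0 q1
    have hmatch : PySem.Chars.startswith (PySem.Chars.upper (q0 ++ ':' :: q1 ++ ':' :: uu))
        ((a ++ ':' :: b) ++ [':']) = true ↔ (a = PySem.Chars.upper q0 ∧ b = PySem.Chars.upper q1) := by
      rw [PySem.Chars.startswith_iff, hu]
      rw [show (a ++ ':' :: b) ++ [':'] = a ++ ':' :: (b ++ ':' :: []) by simp]
      rw [pvPrefix_colon ha hU0, pvPrefix_colon hb hU1]
      simp
    have hkeyeq : ((a ++ ':' :: b : List Char) == PySem.Chars.upper (q0 ++ ':' :: q1)) = true ↔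
        (a = PySem.Chars.upper q0 ∧ b = PySem.Chars.upper q1) := by
      rw [beq_iff_eq, hkey, pvEq_colon ha hU0]
    by_cases hc : a = PySem.Chars.upper q0 ∧ b = PySem.Chars.upper q1
    · obtain ⟨hca, hcb⟩ := hc
      have hlen : ((a ++ ':' :: b) ++ [':']).length = q0.length + q1.length + 2 := by
        have l0 : a.length = q0.length := by rw [hca, pvLen_upper]
        have l1 : b.length = q1.length := by rw [hcb, pvLen_upper]
        simp [l0, l1]; omega
      simp only [pvALoop, PySem.Dict.get?_mk_cons]
      rw [if_pos (hmatch.mpr ⟨hca, hcb⟩), if_pos (hkeyeq.mpr ⟨hca, hcb⟩)]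
      rw [hlen]
      rw [PySem.List.slice_from_natCast]
      rw [pvDrop_bundle]
    · simp only [pvALoop, PySem.Dict.get?_mk_cons]
      rw [if_neg (fun h => hc (hmatch.mp h)), if_neg (fun h => hc (hkeyeq.mp h))]
      exact ih (fun pt h => hitems pt (List.mem_cons_of_mem _ h))

theorem pvScan_nomatch (cleaned : List Char) (hcount : cleaned.count ':' ≤ 1)
    (items : List (List Char × String))
    (hitems : ∀ pt ∈ items, 2 ≤ (pt.1 ++ [':']).count ':') :
    pvALoop cleaned (PySem.Chars.upper cleaned) items = ("barcode", String.mk cleaned) := by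
  induction items with
  | nil => simp [pvALoop]
  | cons pt rest ih =>
    obtain ⟨pre, tipo⟩ := pt
    simp only [pvALoop]
    rw [if_neg]
    · exact ih (fun pt h => hitems pt (List.mem_cons_of_mem _ h))
    · intro hsw
      have hpre := (PySem.Chars.startswith_iff _ _).mp hsw
      have hle : ((pre ++ [':']).count ':') ≤ ((PySem.Chars.upper cleaned).count ':') :=
        hpre.sublist.count_le _
      rw [pvCount_colon_upper] at hle
      have h2 := hitems (pre, tipo) List.mem_cons_self
      simp only at h2
      omega

theorem pvItems_decomp : ∀ pt ∈ pvPREFIJOS_QR,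
    ∃ a b : List Char, ':' ∉ a ∧ ':' ∉ b ∧ pt.1 = a ++ ':' :: b := by
  intro pt h
  simp only [pvPREFIJOS_QR, List.mem_cons, List.not_mem_nil, or_false] at h
  rcases h with rfl | rfl | rfl | rfl | rfl
  · exact ⟨"SPJ".toList, "CONT".toList, by decide, by decide, by decide⟩
  · exact ⟨"SPJ".toList, "PROD".toList, by decide, by decide, by decide⟩
  · exact ⟨"SPJ".toList, "FIDEL".toList, by decide, by decide, by decide⟩
  · exact ⟨"SPJ".toList, "DEL".toList, by decide, by decide, by decide⟩
  · exact ⟨"SPJ".toList, "MAP".toList, by decide, by decide, by decide⟩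

theorem pvItems_two_colons : ∀ pt ∈ pvPREFIJOS_QR, 2 ≤ (pt.1 ++ [':']).count ':' := by
  intro pt h
  simp only [pvPREFIJOS_QR, List.mem_cons, List.not_mem_nil, or_false] at h
  rcases h with rfl | rfl | rfl | rfl | rfl <;> decide

theorem pvMain (cleaned : List Char) :
    pvALoop cleaned (PySem.Chars.upper cleaned) pvPREFIJOS_QR =
      (let t1 := pvPartitionColon cleaned
       let t2 := pvPartitionColon t1.2.2
       if t2.2.1 then
         match pvPrefijosDict.get? (PySem.Chars.upper (t1.1 ++ ':' :: t2.1)) with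
         | some tipo => (tipo, String.mk t2.2.2)
         | none => ("barcode", String.mk cleaned)
       else ("barcode", String.mk cleaned)) := by
  rcases h1 : pvPartitionColon cleaned with ⟨p0, s1, r⟩
  rcases h2 : pvPartitionColon r with ⟨p1, s2, uu⟩
  simp only [h1, h2]
  cases s2 with
  | false =>
    simp only [if_neg Bool.false_ne_true]
    cases s1 with
    | false =>
      obtain ⟨-, -, hmem⟩ := (pvPart_false cleaned p0 r).mp h1
      have hc : cleaned.count ':' ≤ 1 := by
        rw [List.count_eq_zero_of_not_mem hmem]; omega
      exact pvScan_nomatch cleaned hc _ pvItems_two_colons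
    | true =>
      obtain ⟨hp0, heq⟩ := (pvPart_true cleaned p0 r).mp h1
      obtain ⟨-, -, hmemr⟩ := (pvPart_false r p1 uu).mp h2
      have hc : cleaned.count ':' ≤ 1 := by
        rw [heq]
        rw [List.count_append, List.count_cons]
        rw [List.count_eq_zero_of_not_mem hp0, List.count_eq_zero_of_not_mem hmemr]
        simp
      exact pvScan_nomatch cleaned hc _ pvItems_two_colons
  | true =>
    simp only [if_pos rfl]
    obtain ⟨hp1, heqr⟩ := (pvPart_true r p1 uu).mp h2
    have hs1 : s1 = true := by
      by_contra hs
      have hs' : s1 = false := by cases s1 <;> simp_all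
      obtain ⟨-, hr, -⟩ := (pvPart_false cleaned p0 r).mp (hs' ▸ h1)
      rw [hr] at heqr
      cases p1 <;> simp at heqr
    subst hs1
    obtain ⟨hp0, heqc⟩ := (pvPart_true cleaned p0 r).mp h1
    rw [heqr] at heqc
    rw [show p0 ++ ':' :: (p1 ++ ':' :: uu) = p0 ++ ':' :: p1 ++ ':' :: uu by simp] at heqc
    subst heqc
    exact pvScan_match p0 p1 uu hp0 hp1 pvPREFIJOS_QR pvItems_decomp

-- ===== VERDICT (by name: the statement is the Claim_ definition above) =====
theorem parsear_py_spec : Claim_equal_parsear_py := by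
  intro raw _
  unfold Spec_parsear_py parsear_py parsear_py_alt pvPrefijosDict
  exact pvMain (PySem.Chars.strip raw.toList)
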